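-- pv_equiv track=rewrite | github.com/Foolson/pyqsmod | pyqsmod.py | name_colour
-- ===== SOURCE A (Python) =====
-- def name_colour(nick):
--     '''Parse Quake colour codes to HTML (uses pyqscores' CSS stylesheet).'''
--
--     for n in range(8):
--         code = '^' + str(n)
--         html_code = '<SPAN class="c' + str(n) + '">'
--         if nick.rfind(code) > -1:
--             idx = nick.find(code)
--             nick = nick[0:idx] + html_code + nick[idx+2:]
--         else:
--             nick = nick
--     return nick
-- ===== SOURCE B (Python) =====
-- def name_colour(nick):
--     '''Parse Quake colour codes to HTML (uses pyqscores' CSS stylesheet).'''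
--     remaining = set('01234567')
--     out = []
--     i = 0
--     while i < len(nick):
--         c = nick[i]
--         if c == '^' and i + 1 < len(nick) and nick[i + 1] in remaining:
--             d = nick[i + 1]
--             out.append('<SPAN class="c' + d + '">')
--             remaining.remove(d)
--             i += 2
--         else:
--             out.append(c)
--             i += 1
--     return ''.join(out)
-- ===== Notes on version B (the rewrite author's own statement) =====
-- stated objective: alternative
-- what changed: Replaces A's eight find/rfind scans with string re-slicing per code by a single left-to-right pass that keeps a set of not-yet-replaced codes and emits the HTML span at the first occurrence of each.
import Mathlib
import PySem

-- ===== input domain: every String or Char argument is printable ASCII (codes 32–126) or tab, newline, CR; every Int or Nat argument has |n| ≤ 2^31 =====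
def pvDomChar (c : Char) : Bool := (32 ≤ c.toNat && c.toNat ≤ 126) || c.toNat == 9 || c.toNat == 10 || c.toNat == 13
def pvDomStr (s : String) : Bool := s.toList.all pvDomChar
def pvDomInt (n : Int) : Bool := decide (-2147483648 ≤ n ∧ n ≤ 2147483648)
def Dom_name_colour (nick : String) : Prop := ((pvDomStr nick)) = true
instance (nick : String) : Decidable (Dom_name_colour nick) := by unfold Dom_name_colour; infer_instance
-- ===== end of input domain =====

-- B replaces A's eight find/rfind scans (one per colour code, each rebuilding the string)
-- by a single left-to-right pass keeping the set of not-yet-replaced codes; same return value.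

-- ===== PORT A =====
-- loop body of A's 'for n in range(8)' (helper of the transliteration)
def aBody (nick : String) (n : Int) : String :=
  let code := "^" ++ PySem.Int.toStr n
  let html_code := "<SPAN class=\"c" ++ PySem.Int.toStr n ++ "\">"
  if PySem.Str.rfind nick code > -1 then
    let idx := PySem.Str.find nick code
    PySem.Str.slice nick (some 0) (some idx) ++ html_code ++ PySem.Str.slice nick (some (idx + 2)) none
  else
    nick

def name_colour (nick : String) : String :=
  (PySem.List.pyRange 0 8 1).foldl aBody nick

-- ===== PORT B =====
-- the HTML span emitted for digit d (helper of port B's loop)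
def htmlChars (d : Char) : List Char :=
  ['<', 'S', 'P', 'A', 'N', ' ', 'c', 'l', 'a', 's', 's', '=', '"', 'c'] ++ [d] ++ ['"', '>']

-- B's while-loop: rem = codes not yet replaced, acc = the joined output so far
def altLoop (rem : PySem.Set Char) (acc : List Char) : List Char → List Char
  | [] => acc
  | [c] => acc ++ [c]
  | c :: d :: t' =>
    if c == '^' && PySem.Set.contains rem d then
      altLoop (PySem.Set.discard rem d) (acc ++ htmlChars d) t'
    else
      altLoop rem (acc ++ [c]) (d :: t')

def name_colour_alt (nick : String) : String :=
  String.ofList (altLoop (PySem.Set.ofList "01234567".toList) [] nick.toList)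

-- ===== PRECONDITION & SPEC =====
def Spec_name_colour (nick : String) (out : String) : Prop := out = name_colour_alt nick
instance (nick : String) (out : String) : Decidable (Spec_name_colour nick out) := by unfold Spec_name_colour; infer_instance

-- ===== CLAIM (what is proved, stated in full; the proofs are below) =====
def Claim_equal_name_colour : Prop := ∀ (nick : String), Dom_name_colour nick → Spec_name_colour nick (name_colour nick)

-- ===== LEMMAS AND PROOFS =====

-- replace-first-occurrence of "^d": the denotation of one iteration of A's loop
def stepC (d : Char) : List Char → List Char
  | [] => []
  | c :: t =>
    match t with
    | d' :: t' => if c = '^' ∧ d' = d then htmlChars d ++ t' else c :: stepC d t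
    | [] => [c]

def foldSteps (codes : List Char) (l : List Char) : List Char :=
  codes.foldl (fun s d => stepC d s) l

def digitsL : List Char := ['0', '1', '2', '3', '4', '5', '6', '7']

theorem stepC_nil (d : Char) : stepC d [] = [] := rfl

theorem stepC_single (d c : Char) : stepC d [c] = [c] := rfl

theorem stepC_cons2 (d c d' : Char) (t : List Char) :
    stepC d (c :: d' :: t) = if c = '^' ∧ d' = d then htmlChars d ++ t else c :: stepC d (d' :: t) := rfl

theorem stepC_not_caret (d c : Char) (t : List Char) (h : c ≠ '^') :
    stepC d (c :: t) = c :: stepC d t := by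
  cases t with
  | nil => rfl
  | cons x t' => rw [stepC_cons2]; simp [h]

theorem stepC_prefix_no_caret (d : Char) (p s : List Char) (h : '^' ∉ p) :
    stepC d (p ++ s) = p ++ stepC d s := by
  induction p with
  | nil => rfl
  | cons c p' ih =>
    have hc : c ≠ '^' := by intro he; exact h (by simp [he])
    have hp : '^' ∉ p' := by intro hm; exact h (by simp [hm])
    simp only [List.cons_append, stepC_not_caret d c _ hc, ih hp]

theorem stepC_pair_ne (d d' : Char) (t : List Char) (h1 : d' ≠ '^') (h2 : d' ≠ d) :
    stepC d ('^' :: d' :: t) = '^' :: d' :: stepC d t := by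
  rw [stepC_cons2]
  simp [h2, stepC_not_caret d d' t h1]

theorem stepC_head (d : Char) (l : List Char) :
    (stepC d l).head? = l.head? ∨ (stepC d l).head? = some '<' := by
  cases l with
  | nil => left; rfl
  | cons c t =>
    cases t with
    | nil => left; rfl
    | cons d' t' =>
      rw [stepC_cons2]
      by_cases h : c = '^' ∧ d' = d
      · right; simp [h, htmlChars]
      · left; simp [h]

theorem stepC_no_occ (d : Char) (l : List Char) (h : ¬ ['^', d] <:+: l) : stepC d l = l := by
  induction l with
  | nil => rfl
  | cons c t ih =>
    cases t with
    | nil => rfl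
    | cons d' t' =>
      rw [stepC_cons2]
      have hne : ¬ (c = '^' ∧ d' = d) := by
        rintro ⟨h1, h2⟩
        exact h (List.IsPrefix.isInfix ⟨t', by simp [h1, h2]⟩)
      have ht : ¬ ['^', d] <:+: d' :: t' := fun hi => h (List.infix_cons hi)
      simp [hne, ih ht]

theorem stepC_first_occ (d : Char) : ∀ (l : List Char) (i : Nat),
    ['^', d] <+: l.drop i → (∀ j < i, ¬ ['^', d] <+: l.drop j) →
    stepC d l = l.take i ++ htmlChars d ++ l.drop (i + 2) := by
  intro l
  induction l with
  | nil => intro i h _; simp at h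
  | cons c t ih =>
    intro i h hmin
    cases i with
    | zero =>
      simp only [List.drop_zero] at h
      obtain ⟨r, hr⟩ := h
      cases t with
      | nil => simp at hr
      | cons d' t' =>
        simp only [List.cons_append, List.nil_append] at hr
        injection hr with a b; injection b with b1 b2
        rw [stepC_cons2]
        simp [a.symm, b1.symm]
    | succ j =>
      have hnot0 : ¬ ['^', d] <+: (c :: t) := by
        have := hmin 0 (Nat.succ_pos j); simpa using this
      cases t with
      | nil =>
        exfalso
        have h2 : ['^', d] <+: ([] : List Char).drop j := by simpa using h
        simp at h2
      | cons d' t' =>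
        have hne : ¬ (c = '^' ∧ d' = d) := by
          rintro ⟨h1, h2⟩; exact hnot0 ⟨t', by simp [h1, h2]⟩
        rw [stepC_cons2, if_neg hne]
        rw [ih j (by simpa using h) (fun k hk => by
          have := hmin (k + 1) (by omega); simpa using this)]
        have h3 : j + 1 + 2 = (j + 2) + 1 := rfl
        rw [h3, List.take_succ_cons, List.drop_succ_cons]
        simp

theorem fold_nil (codes : List Char) : foldSteps codes [] = [] := by
  induction codes with
  | nil => rfl
  | cons m cs ih => simpa [foldSteps, List.foldl] using ih

theorem fold_single (codes : List Char) (c : Char) : foldSteps codes [c] = [c] := by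
  induction codes with
  | nil => rfl
  | cons m cs ih => simpa [foldSteps, List.foldl, stepC_single] using ih

theorem fold_not_caret (codes : List Char) (c : Char) (h : c ≠ '^') :
    ∀ t, foldSteps codes (c :: t) = c :: foldSteps codes t := by
  induction codes with
  | nil => intro t; rfl
  | cons m cs ih =>
    intro t
    simp only [foldSteps, List.foldl] at *
    rw [stepC_not_caret m c t h, ih (stepC m t)]

theorem fold_caret_nohit (codes : List Char) (hdig : ∀ m ∈ codes, m ∈ digitsL) :
    ∀ X, (∀ m ∈ codes, X.head? ≠ some m) → foldSteps codes ('^' :: X) = '^' :: foldSteps codes X := by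
  induction codes with
  | nil => intro X _; rfl
  | cons m cs ih =>
    intro X hh
    have hdig' : ∀ m' ∈ cs, m' ∈ digitsL := fun m' hm' => hdig m' (List.mem_cons_of_mem m hm')
    cases X with
    | nil =>
      show foldSteps cs (stepC m ['^']) = '^' :: foldSteps cs (stepC m [])
      rw [stepC_single, stepC_nil, fold_nil, fold_single]
    | cons x X' =>
      have hx : x ≠ m := by
        intro he; exact hh m List.mem_cons_self (by simp [he])
      show foldSteps cs (stepC m ('^' :: x :: X')) = '^' :: foldSteps cs (stepC m (x :: X'))
      rw [stepC_cons2, if_neg (by rintro ⟨_, h2⟩; exact hx h2)]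
      apply ih hdig'
      intro m' hm'
      rcases stepC_head m (x :: X') with hh' | hh'
      · rw [hh']; simp only [List.head?_cons]
        intro he; injection he with he
        exact hh m' (List.mem_cons_of_mem m hm') (by simp [he])
      · rw [hh']
        intro he; injection he with he
        have hmem := hdig' m' hm'
        rw [← he] at hmem
        simp [digitsL] at hmem

theorem fold_pair_skip (d' : Char) (hd1 : d' ≠ '^') (codes : List Char) (hd : d' ∉ codes) :
    ∀ t, foldSteps codes ('^' :: d' :: t) = '^' :: d' :: foldSteps codes t := by
  induction codes with
  | nil => intro t; rfl
  | cons m cs ih =>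
    intro t
    have h2 : d' ≠ m := fun he => hd (by simp [he])
    show foldSteps cs (stepC m ('^' :: d' :: t)) = '^' :: d' :: foldSteps cs (stepC m t)
    rw [stepC_pair_ne m d' t hd1 h2]
    exact ih (fun hm => hd (List.mem_cons_of_mem m hm)) (stepC m t)

theorem fold_prefix_no_caret (codes : List Char) (p : List Char) (h : '^' ∉ p) :
    ∀ s, foldSteps codes (p ++ s) = p ++ foldSteps codes s := by
  induction codes with
  | nil => intro s; rfl
  | cons m cs ih =>
    intro s
    show foldSteps cs (stepC m (p ++ s)) = p ++ foldSteps cs (stepC m s)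
    rw [stepC_prefix_no_caret m p s h]
    exact ih (stepC m s)

theorem caret_not_mem_html (d : Char) (hd : d ≠ '^') : '^' ∉ htmlChars d := by
  simp [htmlChars]
  exact fun h => absurd h.symm hd

theorem digit_ne_caret (d : Char) (hd : d ∈ digitsL) : d ≠ '^' := by
  fin_cases hd <;> decide

theorem fold_append (cs1 cs2 : List Char) (l : List Char) :
    foldSteps (cs1 ++ cs2) l = foldSteps cs2 (foldSteps cs1 l) := by
  simp [foldSteps, List.foldl_append]

theorem main_lemma : ∀ (n : Nat) (l : List Char), l.length ≤ n → ∀ (codes : List Char), codes.Nodup →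
    (∀ m ∈ codes, m ∈ digitsL) → ∀ acc, altLoop codes acc l = acc ++ foldSteps codes l := by
  intro n
  induction n with
  | zero =>
    intro l hl codes _ _ acc
    have : l = [] := List.eq_nil_of_length_eq_zero (Nat.le_zero.mp hl)
    subst this
    simp [altLoop, fold_nil]
  | succ n ih =>
    intro l hl codes hnd hdig acc
    cases l with
    | nil => simp [altLoop, fold_nil]
    | cons c t =>
      cases t with
      | nil => simp [altLoop, fold_single]
      | cons d t' =>
        by_cases hhit : c = '^' ∧ d ∈ codes
        · obtain ⟨hc, hd⟩ := hhit
          subst hc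
          obtain ⟨pre, post, rfl⟩ := List.append_of_mem hd
          have hnd' := hnd
          rw [List.nodup_append] at hnd'
          have hdpre : d ∉ pre := fun hm => hnd'.2.2 d hm d List.mem_cons_self rfl
          have hdpost : d ∉ post := by
            have := hnd'.2.1
            rw [List.nodup_cons] at this
            exact this.1
          have hdd : d ∈ digitsL := hdig d hd
          have hcond : (('^' : Char) == '^' && PySem.Set.contains (pre ++ d :: post) d) = true := by
            simp [PySem.Set.contains, hd]
          rw [altLoop]
          simp only [hcond, if_pos]
          have hdisc : PySem.Set.discard (pre ++ d :: post) d = pre ++ post := by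
            simp only [PySem.Set.discard, List.filter_append, List.filter_cons]
            have h1 : pre.filter (fun y => !y == d) = pre :=
              List.filter_eq_self.mpr (fun x hx => by
                simp only [ne_eq, Bool.not_eq_eq_eq_not, Bool.not_true, beq_eq_false_iff_ne]
                exact fun he => hdpre (he ▸ hx))
            have h2 : post.filter (fun y => !y == d) = post :=
              List.filter_eq_self.mpr (fun x hx => by
                simp only [ne_eq, Bool.not_eq_eq_eq_not, Bool.not_true, beq_eq_false_iff_ne]
                exact fun he => hdpost (he ▸ hx))
            simp [h1, h2]
          rw [hdisc]
          have hnodup2 : (pre ++ post).Nodup := by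
            rw [List.nodup_append]
            refine ⟨hnd'.1, ?_, ?_⟩
            · have := hnd'.2.1; rw [List.nodup_cons] at this; exact this.2
            · intro a ha b hb
              exact hnd'.2.2 a ha b (List.mem_cons_of_mem d hb)
          have hdig2 : ∀ m ∈ pre ++ post, m ∈ digitsL := by
            intro m hm
            rcases List.mem_append.mp hm with h | h
            · exact hdig m (List.mem_append.mpr (Or.inl h))
            · exact hdig m (List.mem_append.mpr (Or.inr (List.mem_cons_of_mem d h)))
          rw [ih t' (by simp at hl; omega) (pre ++ post) hnodup2 hdig2 (acc ++ htmlChars d)]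
          -- now compute the A-side fold
          have hrhs : foldSteps (pre ++ d :: post) ('^' :: d :: t') =
              htmlChars d ++ foldSteps (pre ++ post) t' := by
            rw [fold_append]
            rw [fold_pair_skip d (digit_ne_caret d hdd) pre hdpre t']
            show foldSteps post (stepC d ('^' :: d :: foldSteps pre t')) = _
            rw [stepC_cons2, if_pos ⟨rfl, rfl⟩]
            rw [fold_prefix_no_caret post (htmlChars d) (caret_not_mem_html d (digit_ne_caret d hdd))]
            rw [fold_append]
          rw [hrhs, List.append_assoc]
        · have hcond : (c == '^' && PySem.Set.contains codes d) = false := by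
            rcases not_and_or.mp hhit with h | h
            · simp [h]
            · simp [PySem.Set.contains, h]
          rw [altLoop]
          simp only [hcond, Bool.false_eq_true, if_false]
          rw [ih (d :: t') (by simp at hl ⊢; omega) codes hnd hdig (acc ++ [c])]
          have hrhs : foldSteps codes (c :: d :: t') = c :: foldSteps codes (d :: t') := by
            by_cases hc : c = '^'
            · subst hc
              rcases not_and_or.mp hhit with h | h
              · exact absurd rfl h
              · exact fold_caret_nohit codes hdig (d :: t') (fun m hm => by
                  simp only [List.head?_cons]
                  intro he; injection he with he
                  exact h (he ▸ hm))
            · exact fold_not_caret codes c hc (d :: t')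
          rw [hrhs, List.append_assoc]
          rfl

-- rfind returns > -1 exactly when the needle occurs (needed for A's guard)
theorem rfind_go_pos_iff (s sub : List Char) : ∀ (k : Nat),
    (-1 < PySem.Chars.rfind.go s sub k) ↔ ∃ j ≤ k, sub <+: s.drop j := by
  intro k
  induction k with
  | zero =>
    simp only [PySem.Chars.rfind.go]
    by_cases h : sub.isPrefixOf s = true
    · rw [if_pos h]
      constructor
      · intro _; exact ⟨0, le_refl 0, List.isPrefixOf_iff_prefix.mp h⟩
      · intro _; norm_num
    · rw [if_neg h]
      constructor
      · intro hlt; norm_num at hlt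
      · rintro ⟨j, hj, hp⟩
        have hj0 : j = 0 := Nat.le_zero.mp hj
        subst hj0
        exact absurd (List.isPrefixOf_iff_prefix.mpr (by simpa using hp)) h
  | succ j ih =>
    simp only [PySem.Chars.rfind.go]
    by_cases h : sub.isPrefixOf (List.drop (j + 1) s) = true
    · rw [if_pos h]
      constructor
      · intro _; exact ⟨j + 1, le_refl _, List.isPrefixOf_iff_prefix.mp h⟩
      · intro _; omega
    · rw [if_neg h]
      rw [ih]
      constructor
      · rintro ⟨i, hi, hp⟩; exact ⟨i, Nat.le_succ_of_le hi, hp⟩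
      · rintro ⟨i, hi, hp⟩
        rcases Nat.lt_or_ge i (j + 1) with hlt | hge
        · exact ⟨i, Nat.lt_succ_iff.mp hlt, hp⟩
        · exfalso
          have hieq : i = j + 1 := Nat.le_antisymm hi hge
          subst hieq
          exact absurd (List.isPrefixOf_iff_prefix.mpr hp) h

theorem rfind_pos_iff (s sub : List Char) (hsub : sub ≠ []) :
    (-1 < PySem.Chars.rfind s sub) ↔ sub <:+: s := by
  show (-1 < PySem.Chars.rfind.go s sub s.length) ↔ _
  rw [rfind_go_pos_iff]
  constructor
  · rintro ⟨j, _, hp⟩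
    exact hp.isInfix.trans (List.drop_suffix j s).isInfix
  · intro hinf
    obtain ⟨j, hp⟩ := (PySem.Chars.exists_prefix_drop_iff_isIn sub s).mpr ((PySem.Chars.isIn_iff_infix sub s).mpr hinf)
    rcases Nat.lt_or_ge s.length j with hj | hj
    · exfalso
      rw [List.drop_eq_nil_of_le (Nat.le_of_lt hj)] at hp
      exact hsub (List.prefix_nil.mp hp)
    · exact ⟨j, hj, hp⟩

-- A's loop body equals stepC on the character lists
theorem aBody_toList (s : String) (n : Int) (d : Char)
    (hc : ("^" ++ PySem.Int.toStr n).toList = ['^', d])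
    (hh : ("<SPAN class=\"c" ++ PySem.Int.toStr n ++ "\">").toList = htmlChars d) :
    (aBody s n).toList = stepC d s.toList := by
  simp only [aBody, PySem.Str.rfind_eq, PySem.Str.find_eq, hc]
  by_cases hinf : ['^', d] <:+: s.toList
  · rw [if_pos ((rfind_pos_iff s.toList ['^', d] (by simp)).mpr hinf)]
    have hfind : 0 ≤ PySem.Chars.find s.toList ['^', d] :=
      (PySem.Chars.find_nonneg_iff s.toList ['^', d]).mpr hinf
    obtain ⟨hpre, hmin⟩ := PySem.Chars.find_spec hfind
    simp only [String.toList_append, PySem.Str.toList_slice, PySem.Chars.slice_eq_listSlice,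
      PySem.List.slice_zero_start, PySem.List.slice_to _ hfind,
      PySem.List.slice_from _ (by omega : (0:Int) ≤ PySem.Chars.find s.toList ['^', d] + 2), hh]
    have ht2 : (PySem.Chars.find s.toList ['^', d] + 2).toNat
        = (PySem.Chars.find s.toList ['^', d]).toNat + 2 := by omega
    rw [ht2, stepC_first_occ d s.toList (PySem.Chars.find s.toList ['^', d]).toNat hpre hmin]
  · rw [if_neg (fun hgt => hinf ((rfind_pos_iff s.toList ['^', d] (by simp)).mp hgt))]
    rw [stepC_no_occ d s.toList hinf]

-- ===== VERDICT (by name: the statement is the Claim_ definition above) =====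
theorem name_colour_spec : Claim_equal_name_colour := by
  unfold Claim_equal_name_colour Spec_name_colour
  intro nick _
  apply String.toList_injective
  have hset : PySem.Set.ofList "01234567".toList = digitsL := by decide
  have hrange : PySem.List.pyRange 0 8 1 = [0, 1, 2, 3, 4, 5, 6, 7] := by decide
  have hB : (name_colour_alt nick).toList = foldSteps digitsL nick.toList := by
    rw [name_colour_alt, String.toList_ofList, hset,
      main_lemma nick.toList.length nick.toList (le_refl _) digitsL (by decide)
        (fun m hm => hm) [], List.nil_append]
  rw [hB, name_colour, hrange]
  simp only [List.foldl]
  rw [aBody_toList _ 7 '7' (by decide) (by decide), aBody_toList _ 6 '6' (by decide) (by decide),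
    aBody_toList _ 5 '5' (by decide) (by decide), aBody_toList _ 4 '4' (by decide) (by decide),
    aBody_toList _ 3 '3' (by decide) (by decide), aBody_toList _ 2 '2' (by decide) (by decide),
    aBody_toList _ 1 '1' (by decide) (by decide), aBody_toList _ 0 '0' (by decide) (by decide)]
  rfl
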